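-- pv_equiv track=rewrite | github.com/siddhivinayakdubey/DSA | Logical/Python/mishra.py | joshibkl
-- ===== SOURCE A (Python) =====
-- def joshibkl(arr1,arr2):
--     count = 0
--     m = len(arr1)
--     n = len(arr2)
--
--     if m<n:
--         for i in range(0,n):
--             if arr2[i] not in arr1:
--                 count+=1
--     else:
--         for i in range(0,m):
--             if arr1[i] not in arr2:
--                 count+=1
--
--     return count
-- ===== SOURCE B (Python) =====
-- def joshibkl(arr1, arr2):
--     # Sort-and-merge sweep: O((m+n) log(m+n)) instead of A's O(m*n) membership scans.
--     if len(arr1) < len(arr2):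
--         big, small = arr2, arr1
--     else:
--         big, small = arr1, arr2
--     return _merge_count(sorted(big), sorted(small))
--
--
-- def _merge_count(b, s):
--     count = 0
--     i = j = 0
--     while i < len(b):
--         if j < len(s) and s[j] < b[i]:
--             j += 1
--         elif j < len(s) and s[j] == b[i]:
--             i += 1
--         else:
--             count += 1
--             i += 1
--     return count
-- ===== Notes on version B (the rewrite author's own statement) =====
-- stated objective: faster
-- what changed: Replaces the per-element linear membership scan over the other array with sorting copies of both arrays and counting absent elements in a single two-pointer merge pass.
import Mathlib
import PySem

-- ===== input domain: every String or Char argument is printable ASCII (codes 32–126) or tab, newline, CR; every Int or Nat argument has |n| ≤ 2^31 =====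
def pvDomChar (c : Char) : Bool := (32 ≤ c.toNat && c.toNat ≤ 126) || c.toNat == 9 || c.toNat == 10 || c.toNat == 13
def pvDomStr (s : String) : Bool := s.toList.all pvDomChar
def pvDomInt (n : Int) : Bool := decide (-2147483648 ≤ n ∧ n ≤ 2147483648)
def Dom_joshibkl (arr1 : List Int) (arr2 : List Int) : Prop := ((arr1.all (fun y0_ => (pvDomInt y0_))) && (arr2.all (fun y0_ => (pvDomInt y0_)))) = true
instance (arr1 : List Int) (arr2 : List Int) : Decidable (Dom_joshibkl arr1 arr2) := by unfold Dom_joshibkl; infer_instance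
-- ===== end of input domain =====

-- B replaces A's per-element linear membership scans with sort copies + one two-pointer merge pass (return value only; neither mutates its arguments).


-- ===== PORT A =====
def joshibkl (arr1 : List Int) (arr2 : List Int) : Int :=
  let count : Int := 0
  let m := arr1.length
  let n := arr2.length
  if m < n then
    (List.range n).foldl (fun count i => if arr2.getD i 0 ∉ arr1 then count + 1 else count) count
  else
    (List.range m).foldl (fun count i => if arr1.getD i 0 ∉ arr2 then count + 1 else count) count

-- ===== PORT B =====
-- _merge_count from Source B: the while loop over (i, j) becomes structural recursion on the two lists
def pvMergeCount : List Int → List Int → Int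
  | [], _ => 0
  | x :: xs, [] => pvMergeCount xs [] + 1
  | x :: xs, y :: ys =>
    if y < x then pvMergeCount (x :: xs) ys
    else if y = x then pvMergeCount xs (y :: ys)
    else pvMergeCount xs (y :: ys) + 1
termination_by b s => b.length + s.length

def joshibkl_alt (arr1 : List Int) (arr2 : List Int) : Int :=
  let p := if arr1.length < arr2.length then (arr2, arr1) else (arr1, arr2)
  pvMergeCount (PySem.List.sorted p.1 (fun x => x) false) (PySem.List.sorted p.2 (fun x => x) false)

-- ===== PRECONDITION & SPEC =====
def Spec_joshibkl (arr1 : List Int) (arr2 : List Int) (out : Int) : Prop := out = joshibkl_alt arr1 arr2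
instance (arr1 : List Int) (arr2 : List Int) (out : Int) : Decidable (Spec_joshibkl arr1 arr2 out) := by unfold Spec_joshibkl; infer_instance

-- ===== CLAIM (what is proved, stated in full; the proofs are below) =====
def Claim_equal_joshibkl : Prop := ∀ (arr1 : List Int) (arr2 : List Int), Dom_joshibkl arr1 arr2 → Spec_joshibkl arr1 arr2 (joshibkl arr1 arr2)

-- ===== LEMMAS AND PROOFS =====

-- the index loop over range(len xs) is the fold over xs itself
lemma foldl_range_getD (xs : List Int) (f : Int → Int → Int) (c : Int) :
    (List.range xs.length).foldl (fun c i => f c (xs.getD i 0)) c = xs.foldl f c := by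
  induction xs generalizing c with
  | nil => simp
  | cons x xs ih =>
    simp only [List.length_cons, List.range_succ_eq_map, List.foldl_cons, List.foldl_map,
      List.getD_cons_zero, List.getD_cons_succ]
    exact ih (f c x)

-- counting fold = length of the filtered list
lemma foldl_count (xs : List Int) (p : Int → Prop) [DecidablePred p] (c : Int) :
    xs.foldl (fun c x => if p x then c + 1 else c) c
      = c + ((xs.filter (fun x => decide (p x))).length : Int) := by
  induction xs generalizing c with
  | nil => simp
  | cons x xs ih =>
    simp only [List.foldl_cons, List.filter_cons]
    by_cases h : p x
    · simp [h, ih]; ring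
    · simp [h, ih]

-- merge pass on sorted lists counts the big-side elements absent from the small side
lemma pvMergeCount_eq (b s : List Int) (hb : b.Pairwise (· ≤ ·)) (hs : s.Pairwise (· ≤ ·)) :
    pvMergeCount b s = ((b.filter (fun x => decide (x ∉ s))).length : Int) := by
  induction b, s using pvMergeCount.induct with
  | case1 s => simp [pvMergeCount]
  | case2 x xs ih =>
    rw [pvMergeCount, ih hb.tail hs]
    simp
  | case3 x xs y ys hlt ih =>
    have key : ∀ a ∈ x :: xs, (decide (a ∉ y :: ys)) = (decide (a ∉ ys)) := by
      intro a ha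
      have hya : y < a := by
        rcases List.mem_cons.mp ha with rfl | hm
        · exact hlt
        · exact lt_of_lt_of_le hlt ((List.pairwise_cons.mp hb).1 a hm)
      simp [List.mem_cons, hya.ne']
    rw [pvMergeCount, if_pos hlt, ih hb hs.tail, List.filter_congr key]
  | case4 xs y ys hlt ih =>
    rw [pvMergeCount, if_neg hlt, if_pos rfl, ih hb.tail hs]
    simp
  | case5 x xs y ys hlt heq ih =>
    rw [pvMergeCount, if_neg hlt, if_neg heq, ih hb.tail hs]
    have hxy : x < y := lt_of_le_of_ne (not_lt.mp hlt) (fun h => heq h.symm)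
    have hx2 : x ∉ ys := fun hm =>
      absurd hxy (not_lt.mpr ((List.pairwise_cons.mp hs).1 x hm))
    simp only [List.filter_cons, List.mem_cons, not_or, decide_eq_true_eq]
    rw [if_pos ⟨hxy.ne, hx2⟩]
    simp

-- B's side for one big/small pair, phrased over the unsorted lists
lemma merge_side (big small : List Int) :
    pvMergeCount (PySem.List.sorted big (fun x => x) false) (PySem.List.sorted small (fun x => x) false)
      = ((big.filter (fun x => decide (x ∉ small))).length : Int) := by
  have hb := PySem.List.sorted_pairwise big (fun x => x)
  have hs := PySem.List.sorted_pairwise small (fun x => x)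
  rw [pvMergeCount_eq _ _ hb hs]
  have h1 : (PySem.List.sorted big (fun x => x) false).filter
      (fun x => decide (x ∉ PySem.List.sorted small (fun x => x) false))
      = (PySem.List.sorted big (fun x => x) false).filter (fun x => decide (x ∉ small)) := by
    apply List.filter_congr
    intro a _
    simp [PySem.List.mem_sorted]
  rw [h1]
  have hperm := (PySem.List.sorted_perm big (fun x => x) false).filter
    (fun x => decide (x ∉ small))
  rw [hperm.length_eq]

-- A's side for one big/small pair
lemma a_side (big small : List Int) :
    (List.range big.length).foldl (fun c i => if big.getD i 0 ∉ small then c + 1 else c) (0 : Int)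
      = ((big.filter (fun x => decide (x ∉ small))).length : Int) := by
  rw [foldl_range_getD big (fun c x => if x ∉ small then c + 1 else c) 0,
    foldl_count big (fun x => x ∉ small) 0]
  simp

-- ===== VERDICT (by name: the statement is the Claim_ definition above) =====
theorem joshibkl_spec : Claim_equal_joshibkl := by
  intro arr1 arr2 _
  unfold Spec_joshibkl joshibkl joshibkl_alt
  by_cases h : arr1.length < arr2.length
  · simp only [h, if_true]
    rw [a_side arr2 arr1, merge_side arr2 arr1]
  · simp only [h, if_false]
    rw [a_side arr1 arr2, merge_side arr1 arr2]
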